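-- pv_equiv track=rewrite | github.com/beetee17/week4_divide_and_conquer | week4_divide_and_conquer/5_organizing_a_lottery/points_and_segments.py | get_master_list
-- ===== SOURCE A (Python) =====
-- def get_master_list(starts, ends, points):
--
--     a = []
--     starts_dict = {}
--     ends_dict = {}
--     points_dict = {}
--     num_set = sorted(set(starts + ends + points))
--     for num in num_set:
--         starts_dict.update({num: 0})
--         ends_dict.update({num: 0})
--         points_dict.update({num: 0})
--
--     for s in starts:
--         starts_dict[s] += 1
--
--     for p in points:
--         points_dict[p] += 1
--
--     for e in ends:
--         ends_dict[e] += 1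
--
--     for num in num_set:
--         for i in range(starts_dict[num]):
--             a.append((num, 'l'))
--         for i in range(points_dict[num]):
--             a.append((num, 'p'))
--         for i in range(ends_dict[num]):
--             a.append((num, 'r'))
--     return a
-- ===== SOURCE B (Python) =====
-- def get_master_list(starts, ends, points):
--     events = [(s, 'l') for s in starts] + [(p, 'p') for p in points] + [(e, 'r') for e in ends]
--     return sorted(events)
-- ===== Notes on version B (the rewrite author's own statement) =====
-- stated objective: simpler
-- what changed: Replaces A's three zero-initialized count dictionaries, three counting loops and the nested bucket-replay loops with a single tagged event list ((x,'l')/(x,'p')/(x,'r')) sorted once, relying on Python's lexicographic tuple comparison and 'l'<'p'<'r'.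
import Mathlib
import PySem

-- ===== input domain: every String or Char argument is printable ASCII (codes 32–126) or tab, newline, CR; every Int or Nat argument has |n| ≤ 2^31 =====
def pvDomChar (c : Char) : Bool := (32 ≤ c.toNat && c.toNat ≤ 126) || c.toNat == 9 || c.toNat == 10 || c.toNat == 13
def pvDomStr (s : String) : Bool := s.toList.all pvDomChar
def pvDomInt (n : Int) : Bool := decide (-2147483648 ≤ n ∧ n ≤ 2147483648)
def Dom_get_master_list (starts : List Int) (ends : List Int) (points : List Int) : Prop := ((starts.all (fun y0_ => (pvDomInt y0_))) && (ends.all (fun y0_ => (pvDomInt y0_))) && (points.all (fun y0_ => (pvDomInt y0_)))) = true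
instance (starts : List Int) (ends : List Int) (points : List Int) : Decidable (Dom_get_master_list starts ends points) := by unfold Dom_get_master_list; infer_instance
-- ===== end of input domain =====

-- B replaces A's three count dictionaries and bucket-replay loops by one sort of tagged events (simpler, same result).

-- ===== PORT A =====
def get_master_list (starts : List Int) (ends : List Int) (points : List Int) : List (Int × String) :=
  -- a = []; num_set = sorted(set(starts + ends + points))
  let num_set := PySem.List.sorted (PySem.Set.ofList (starts ++ ends ++ points)) (fun x => x)
  -- one loop over num_set initialising the three dicts to 0 (a fold over the triple of dicts)
  let dicts := num_set.foldl
    (fun (t : PySem.Dict Int Int × PySem.Dict Int Int × PySem.Dict Int Int) num =>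
      (t.1.insert num 0, t.2.1.insert num 0, t.2.2.insert num 0))
    (PySem.Dict.empty, PySem.Dict.empty, PySem.Dict.empty)
  -- d[k] += 1: k is always a key here (initialised above), so Dict.modify is exact (no KeyError reachable)
  let starts_dict := starts.foldl (fun d s => d.modify s 0 (· + 1)) dicts.1
  let points_dict := points.foldl (fun d p => d.modify p 0 (· + 1)) dicts.2.1
  let ends_dict := ends.foldl (fun d e => d.modify e 0 (· + 1)) dicts.2.2
  -- final replay loop; d[num] with num a key of d, exact as getD
  num_set.foldl (fun a num =>
    let a := (PySem.List.pyRange 0 (starts_dict.getD num 0)).foldl (fun a _ => a ++ [(num, "l")]) a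
    let a := (PySem.List.pyRange 0 (points_dict.getD num 0)).foldl (fun a _ => a ++ [(num, "p")]) a
    (PySem.List.pyRange 0 (ends_dict.getD num 0)).foldl (fun a _ => a ++ [(num, "r")]) a) []

-- ===== PORT B =====
-- Python compares the (int, str) tuples lexicographically; toLex gives exactly that order on Int × String.
def get_master_list_alt (starts : List Int) (ends : List Int) (points : List Int) : List (Int × String) :=
  let events := starts.map (fun s => (s, "l")) ++ points.map (fun p => (p, "p")) ++ ends.map (fun e => (e, "r"))
  PySem.List.sorted events (fun ev => toLex ev)

-- ===== PRECONDITION & SPEC =====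
def Spec_get_master_list (starts : List Int) (ends : List Int) (points : List Int) (out : List (Int × String)) : Prop := out = get_master_list_alt starts ends points
instance (starts : List Int) (ends : List Int) (points : List Int) (out : List (Int × String)) : Decidable (Spec_get_master_list starts ends points out) := by unfold Spec_get_master_list; infer_instance

-- ===== CLAIM (what is proved, stated in full; the proofs are below) =====
def Claim_equal_get_master_list : Prop := ∀ (starts : List Int) (ends : List Int) (points : List Int), Dom_get_master_list starts ends points → Spec_get_master_list starts ends points (get_master_list starts ends points)

-- ===== LEMMAS AND PROOFS =====

-- the bucket of events A emits for one coordinate n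
def pvBlock (starts ends points : List Int) (n : Int) : List (Int × String) :=
  List.replicate (starts.count n) (n, "l") ++ List.replicate (points.count n) (n, "p") ++
    List.replicate (ends.count n) (n, "r")

-- the tagged event list B sorts
def pvEvents (starts ends points : List Int) : List (Int × String) :=
  starts.map (fun s => (s, "l")) ++ points.map (fun p => (p, "p")) ++ ends.map (fun e => (e, "r"))

-- the componentwise triple fold is the triple of folds
lemma pv_trifold (l : List Int) (t : PySem.Dict Int Int × PySem.Dict Int Int × PySem.Dict Int Int) :
    l.foldl (fun (t : PySem.Dict Int Int × PySem.Dict Int Int × PySem.Dict Int Int) num =>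
      (t.1.insert num 0, t.2.1.insert num 0, t.2.2.insert num 0)) t =
    (l.foldl (fun d num => d.insert num 0) t.1,
     l.foldl (fun d num => d.insert num 0) t.2.1,
     l.foldl (fun d num => d.insert num 0) t.2.2) := by
  induction l generalizing t with
  | nil => rfl
  | cons x xs ih => simp [List.foldl_cons, ih]

-- the zero-initialisation dict answers 0 everywhere
lemma pv_init_getD (l : List Int) (d : PySem.Dict Int Int) (v : Int) (h : d.getD v 0 = 0) :
    (l.foldl (fun d num => d.insert num 0) d).getD v 0 = 0 := by
  induction l generalizing d with
  | nil => exact h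
  | cons x xs ih => exact ih _ (by rw [PySem.Dict.getD_insert]; split <;> simp [h])

lemma pv_init_getD' (l : List Int) (v : Int) :
    (l.foldl (fun d num => d.insert num 0) (PySem.Dict.empty : PySem.Dict Int Int)).getD v 0 = 0 :=
  pv_init_getD l _ v (PySem.Dict.getD_empty v 0)

-- 'for i in range(c): a.append(x)' appends c copies of x
lemma pv_range_append (c : Nat) (x : Int × String) (a : List (Int × String)) :
    (PySem.List.pyRange 0 (c : Int)).foldl (fun a _ => a ++ [x]) a = a ++ List.replicate c x := by
  rw [PySem.List.pyRange_zero_natCast, List.foldl_map, PySem.List.foldl_append_singleton_eq_map]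
  simp [List.map_const']

-- A's replay loop emits the concatenation of the buckets
lemma pv_replay (starts ends points : List Int) (l : List Int) (a : List (Int × String)) :
    l.foldl (fun a num =>
      let a := (PySem.List.pyRange 0 ((starts.count num : Nat) : Int)).foldl (fun a _ => a ++ [(num, "l")]) a
      let a := (PySem.List.pyRange 0 ((points.count num : Nat) : Int)).foldl (fun a _ => a ++ [(num, "p")]) a
      (PySem.List.pyRange 0 ((ends.count num : Nat) : Int)).foldl (fun a _ => a ++ [(num, "r")]) a) a =
    a ++ l.flatMap (pvBlock starts ends points) := by
  induction l generalizing a with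
  | nil => simp
  | cons x xs ih =>
    rw [List.foldl_cons, ih]
    simp only [pv_range_append, List.flatMap_cons, pvBlock, List.append_assoc]

-- A's result is the concatenation of the buckets over the sorted distinct coordinates
lemma pv_A_eq_flatMap (starts ends points : List Int) :
    get_master_list starts ends points =
    (PySem.List.sorted (PySem.Set.ofList (starts ++ ends ++ points)) (fun x => x)).flatMap
      (pvBlock starts ends points) := by
  simp only [get_master_list, pv_trifold, PySem.Dict.getD_foldl_modify_add_one, pv_init_getD',
    zero_add]
  exact pv_replay _ _ _ _ _

-- counting one pair inside a bucket
lemma pv_count_block (starts ends points : List Int) (n m : Int) (t : String) :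
    (pvBlock starts ends points m).count (n, t) =
    if m = n then
      (if t = "l" then starts.count n else 0) + (if t = "p" then points.count n else 0) +
        (if t = "r" then ends.count n else 0)
    else 0 := by
  simp only [pvBlock, List.count_append, List.count_replicate]
  split_ifs <;> simp_all

-- summing an 'if m = n then C else 0' over a Nodup list
lemma pv_sum_ite (l : List Int) (n : Int) (C : Nat) (hnd : l.Nodup) :
    (l.map (fun m => if m = n then C else 0)).sum = if n ∈ l then C else 0 := by
  induction l with
  | nil => simp
  | cons x xs ih =>
    simp only [List.nodup_cons] at hnd
    by_cases hx : x = n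
    · subst hx
      simp [ih hnd.2, hnd.1]
    · have hnx : ¬ n = x := fun h => hx h.symm
      simp [hx, hnx, ih hnd.2]

-- counting one pair among the tagged events
lemma pv_count_events (starts ends points : List Int) (n : Int) (t : String) :
    (pvEvents starts ends points).count (n, t) =
    (if t = "l" then starts.count n else 0) + (if t = "p" then points.count n else 0) +
      (if t = "r" then ends.count n else 0) := by
  have key : ∀ (l : List Int) (tag : String),
      (l.map (fun s => (s, tag))).count (n, t) = if t = tag then l.count n else 0 := by
    intro l tag
    by_cases ht : t = tag
    · subst ht
      rw [if_pos rfl]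
      exact l.count_map_of_injective (fun s => (s, t)) (fun a b h => ((Prod.mk.injEq _ _ _ _).mp h).1) n
    · rw [if_neg ht]
      refine List.count_eq_zero.mpr (fun h => ht ?_)
      obtain ⟨s, _, hs⟩ := List.mem_map.mp h
      exact ((Prod.mk.injEq _ _ _ _).mp hs).2.symm
  simp [pvEvents, List.count_append, key, Nat.add_assoc]

-- the sorted distinct coordinates: Nodup and membership
lemma pv_ns_nodup (xs : List Int) :
    (PySem.List.sorted (PySem.Set.ofList xs) (fun x => x)).Nodup :=
  List.Pairwise.imp (fun h => ne_of_lt h) (PySem.List.sorted_ofList_pairwise_lt xs)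

lemma pv_ns_mem (starts ends points : List Int) (n : Int) :
    n ∈ PySem.List.sorted (PySem.Set.ofList (starts ++ ends ++ points)) (fun x => x) ↔
      n ∈ starts ∨ n ∈ ends ∨ n ∈ points := by
  rw [PySem.List.mem_sorted, PySem.Set.mem_ofList]
  simp [List.mem_append]

-- the buckets are a permutation of the tagged events
lemma pv_perm (starts ends points : List Int) :
    ((PySem.List.sorted (PySem.Set.ofList (starts ++ ends ++ points)) (fun x => x)).flatMap
      (pvBlock starts ends points)).Perm (pvEvents starts ends points) := by
  refine List.perm_iff_count.mpr (fun x => ?_)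
  obtain ⟨n, t⟩ := x
  rw [List.count_flatMap, pv_count_events]
  simp only [Function.comp_def, pv_count_block]
  rw [pv_sum_ite _ n _ (pv_ns_nodup _)]
  by_cases hn : n ∈ PySem.List.sorted (PySem.Set.ofList (starts ++ ends ++ points)) (fun x => x)
  · rw [if_pos hn]
  · have h1 : n ∉ starts := fun h => hn ((pv_ns_mem starts ends points n).mpr (Or.inl h))
    have h2 : n ∉ ends := fun h => hn ((pv_ns_mem starts ends points n).mpr (Or.inr (Or.inl h)))
    have h3 : n ∉ points := fun h => hn ((pv_ns_mem starts ends points n).mpr (Or.inr (Or.inr h)))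
    rw [if_neg hn, List.count_eq_zero.mpr h1, List.count_eq_zero.mpr h2,
      List.count_eq_zero.mpr h3]
    simp

-- every event of a bucket carries the bucket's coordinate
lemma pv_block_fst (starts ends points : List Int) (m : Int) (x : Int × String)
    (hx : x ∈ pvBlock starts ends points m) : x.1 = m := by
  simp only [pvBlock] at hx
  rcases List.mem_append.mp hx with h | h
  · rcases List.mem_append.mp h with h' | h' <;> rw [List.eq_of_mem_replicate h']
  · rw [List.eq_of_mem_replicate h]

-- one bucket is internally sorted ("l" ≤ "p" ≤ "r" at the same coordinate)
lemma pv_block_pairwise (starts ends points : List Int) (n : Int) :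
    (pvBlock starts ends points n).Pairwise (fun a b => toLex a ≤ toLex b) := by
  have hkey : ∀ (t₁ t₂ : String), t₁ ≤ t₂ → toLex ((n, t₁) : Int × String) ≤ toLex (n, t₂) :=
    fun t₁ t₂ h => Prod.Lex.toLex_le_toLex.mpr (Or.inr ⟨rfl, h⟩)
  have hlp : ("l" : String) ≤ "p" := le_of_lt (String.lt_iff_toList_lt.mpr (by decide))
  have hpr : ("p" : String) ≤ "r" := le_of_lt (String.lt_iff_toList_lt.mpr (by decide))
  have hlr : ("l" : String) ≤ "r" := le_of_lt (String.lt_iff_toList_lt.mpr (by decide))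
  have hrep : ∀ (c : Nat) (t : String),
      (List.replicate c ((n, t) : Int × String)).Pairwise (fun a b => toLex a ≤ toLex b) :=
    fun c t => List.pairwise_replicate.mpr (Or.inr (le_refl _))
  rw [pvBlock, List.pairwise_append]
  refine ⟨?_, hrep _ _, ?_⟩
  · rw [List.pairwise_append]
    refine ⟨hrep _ _, hrep _ _, ?_⟩
    intro x hx y hy
    rw [List.eq_of_mem_replicate hx, List.eq_of_mem_replicate hy]
    exact hkey _ _ hlp
  · intro x hx y hy
    rw [List.eq_of_mem_replicate hy]
    rcases List.mem_append.mp hx with h | h <;> rw [List.eq_of_mem_replicate h]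
    · exact hkey _ _ hlr
    · exact hkey _ _ hpr

-- the concatenated buckets are sorted in Python's tuple order
lemma pv_pairwise (starts ends points : List Int) :
    ((PySem.List.sorted (PySem.Set.ofList (starts ++ ends ++ points)) (fun x => x)).flatMap
      (pvBlock starts ends points)).Pairwise (fun a b => toLex a ≤ toLex b) := by
  rw [List.pairwise_flatMap]
  refine ⟨fun n _ => pv_block_pairwise starts ends points n, ?_⟩
  refine (PySem.List.sorted_ofList_pairwise_lt (starts ++ ends ++ points)).imp ?_
  intro a b hab x hx y hy
  refine le_of_lt (Prod.Lex.toLex_lt_toLex.mpr (Or.inl ?_))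
  rw [pv_block_fst _ _ _ _ _ hx, pv_block_fst _ _ _ _ _ hy]
  exact hab

-- ===== VERDICT (by name: the statement is the Claim_ definition above) =====
theorem get_master_list_spec : Claim_equal_get_master_list := by
  intro starts ends points _
  unfold Spec_get_master_list get_master_list_alt
  rw [pv_A_eq_flatMap]
  have hB := PySem.List.sorted_perm (pvEvents starts ends points) (fun ev => toLex ev) false
  have hA := pv_perm starts ends points
  exact PySem.List.eq_of_perm_of_pairwise_le_of_injective (fun ev => toLex ev)
    (fun a b h => toLex.injective h) (hA.trans hB.symm) (pv_pairwise starts ends points)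
    (PySem.List.sorted_pairwise (pvEvents starts ends points) (fun ev => toLex ev))
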